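-- pv_equiv track=rewrite | github.com/GraceKoffi/SAE | S102/community_detection.py | find_community_from_person
-- ===== SOURCE A (Python) =====
-- def all_his_friends(network, person, group):
--     """ Prend en paramètre un réseau, une personne et un groupe de personnes.
--     Retourne True si la personne passé en paramètre est amie avec toutes les personnes du groupe passé en paramètre
--     et False sinon."""
--
--     #si person n'est pas une clé du network
--     if person not in list(network):
--         return False
--
--     #sinon initialisation de variable
--     i = 0
--     #on parcours group passé en paramètre
--     while i < len(group):
--         #si group[i] n'est pas dans le tableau d'amis de person
--         if group[i] not in network[person]:
--             return False
--         i += 1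
--
--     return True
--
-- def find_community_from_person(network, person):
--     """ Prend en paramètre un réseau et une personne.
--     Retourne une communauté maximale contenant cette personne selon l'heuristique. """
--
--     #initialisation des variables
--     community = [person] #ajouter 'person' au tableau 'community'
--     tab = list(network)
--     i = 0
--
--     #on parcours la liste des clés de network
--     while i < len(tab):
--         #si d'après l'appel de la fonction all_his_friends, tab[i] est amis avec les personnes déjà dans community
--         if all_his_friends(network, tab[i], community):
--             community.append(tab[i]) #ajouter tab[i] dans le tableau community
--         i += 1
--
--     return community
-- ===== SOURCE B (Python) =====
-- def find_community_from_person(network, person):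
--     """Greedy maximal community containing `person`, via a reverse-adjacency
--     index and an incremental count of satisfied community-friendships per
--     candidate: O(n + E) instead of rescanning the community for every key."""
--     keys = list(network)
--     # reverse index: friend f -> keys whose friend list contains f (key order)
--     rev = {}
--     for k in keys:
--         for f in dict.fromkeys(network[k]):
--             rev.setdefault(f, []).append(k)
--     # cnt[k] = how many current community members are friends of k
--     cnt = dict.fromkeys(keys, 0)
--     community = [person]
--     for j in rev.get(person, []):
--         cnt[j] += 1
--     for k in keys:
--         if cnt[k] == len(community):
--             community.append(k)
--             for j in rev.get(k, []):
--                 cnt[j] += 1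
--     return community
-- ===== Notes on version B (the rewrite author's own statement) =====
-- stated objective: faster
-- what changed: Instead of re-scanning the whole current community against each key's friend list (all_his_friends), B builds a reverse-adjacency index once and maintains, per candidate key, an incremental count of community members that are its friends, appending a key exactly when its count equals the community size.
import Mathlib
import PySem

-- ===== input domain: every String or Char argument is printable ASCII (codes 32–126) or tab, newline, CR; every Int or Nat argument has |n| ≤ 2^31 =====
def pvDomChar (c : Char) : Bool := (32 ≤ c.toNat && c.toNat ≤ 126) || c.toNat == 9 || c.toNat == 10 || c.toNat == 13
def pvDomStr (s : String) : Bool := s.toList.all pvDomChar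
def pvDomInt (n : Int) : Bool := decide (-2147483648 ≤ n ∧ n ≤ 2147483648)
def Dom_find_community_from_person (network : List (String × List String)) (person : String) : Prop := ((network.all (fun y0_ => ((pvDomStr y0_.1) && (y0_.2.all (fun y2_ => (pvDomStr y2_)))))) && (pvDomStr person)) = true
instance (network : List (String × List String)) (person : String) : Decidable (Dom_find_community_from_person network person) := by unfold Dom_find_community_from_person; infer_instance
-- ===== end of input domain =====

-- B replaces A's per-key rescan of the community with a reverse-adjacency index and
-- incremental counts of satisfied community-friendships (objective: faster, asymptotic).

-- ===== PORT A =====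
-- while-loop of all_his_friends over `group`
def ahfLoop (friends : List String) (group : List String) : Bool :=
  match group with
  | [] => true
  | g :: rest => if !(friends.contains g) then false else ahfLoop friends rest

def all_his_friends (network : List (String × List String)) (person : String) (group : List String) : Bool :=
  if !((PySem.Dict.mk network).keys.contains person) then false
  else ahfLoop ((PySem.Dict.mk network).getD person []) group

-- while-loop of find_community_from_person over `tab`
def fcLoopA (network : List (String × List String)) (tab : List String) (community : List String) : List String :=
  match tab with
  | [] => community
  | k :: rest =>
    if all_his_friends network k community then fcLoopA network rest (community ++ [k])
    else fcLoopA network rest community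

def find_community_from_person (network : List (String × List String)) (person : String) : List String :=
  fcLoopA network ((PySem.Dict.mk network).keys) [person]

-- ===== PORT B =====
-- rev.setdefault(f, []).append(k) over all keys k and distinct friends f of k
def revBuild (net : PySem.Dict String (List String)) (keys : List String) : PySem.Dict String (List String) :=
  keys.foldl (fun rev k =>
    (PySem.List.dedup (net.getD k [])).foldl (fun rev f => rev.modify f [] (· ++ [k])) rev)
    PySem.Dict.empty

-- `for j in js: cnt[j] += 1`
def bump (cnt : PySem.Dict String Int) (js : List String) : PySem.Dict String Int :=
  js.foldl (fun c j => c.modify j 0 (· + 1)) cnt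

-- the main `for k in keys:` loop of B
def fcLoopB (rev : PySem.Dict String (List String)) (keys : List String)
    (cnt : PySem.Dict String Int) (community : List String) : List String :=
  match keys with
  | [] => community
  | k :: rest =>
    if cnt.getD k 0 == (community.length : Int) then
      fcLoopB rev rest (bump cnt (rev.getD k [])) (community ++ [k])
    else fcLoopB rev rest cnt community

def find_community_from_person_alt (network : List (String × List String)) (person : String) : List String :=
  let net := PySem.Dict.mk network
  let keys := net.keys
  let rev := revBuild net keys
  let cnt0 := keys.foldl (fun c k => c.insert k (0 : Int)) PySem.Dict.empty
  let cnt1 := bump cnt0 (rev.getD person [])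
  fcLoopB rev keys cnt1 [person]

-- ===== PRECONDITION & SPEC =====
-- Pre_ excludes association lists with duplicate keys: A's parameter is a Python dict,
-- which such lists cannot represent (first-vs-last value is ambiguous).
def Pre_find_community_from_person (network : List (String × List String)) (person : String) : Prop :=
  (network.map Prod.fst).Nodup
instance (network : List (String × List String)) (person : String) : Decidable (Pre_find_community_from_person network person) := by unfold Pre_find_community_from_person; infer_instance

def pvWitness_find_community_from_person : (List (String × List String)) × String :=
  ([("a", ["b"]), ("b", ["a", "b"])], "b")

def Spec_find_community_from_person (network : List (String × List String)) (person : String) (out : List String) : Prop := out = find_community_from_person_alt network person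
instance (network : List (String × List String)) (person : String) (out : List String) : Decidable (Spec_find_community_from_person network person out) := by unfold Spec_find_community_from_person; infer_instance

-- ===== CLAIM (what is proved, stated in full; the proofs are below) =====
def Claim_equal_find_community_from_person : Prop := ∀ (network : List (String × List String)) (person : String), Dom_find_community_from_person network person → Pre_find_community_from_person network person → Spec_find_community_from_person network person (find_community_from_person network person)

-- ===== LEMMAS AND PROOFS =====

theorem ahfLoop_eq_all (fr g : List String) :
    ahfLoop fr g = g.all (fun m => fr.contains m) := by
  induction g with
  | nil => rfl
  | cons x xs ih => by_cases h : fr.contains x <;> simp [ahfLoop, h, ih]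

theorem bump_getD (cnt : PySem.Dict String Int) (js : List String) (j : String) :
    (bump cnt js).getD j 0 = cnt.getD j 0 + (js.count j : Int) := by
  simpa [bump] using PySem.Dict.getD_foldl_modify_add_one js cnt j

theorem getD_foldl_insert_zero (ks : List String) (c : PySem.Dict String Int)
    (h : ∀ j, c.getD j 0 = 0) : ∀ j, (ks.foldl (fun c k => c.insert k (0 : Int)) c).getD j 0 = 0 := by
  induction ks generalizing c with
  | nil => exact h
  | cons k ks ih =>
      intro j
      simp only [List.foldl_cons]
      refine ih _ (fun j => ?_) j
      rw [PySem.Dict.getD_insert]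
      split <;> simp [h]

theorem inner_getD (fs : List String) (k c : String) (rev : PySem.Dict String (List String)) :
    (fs.foldl (fun r f => r.modify f [] (· ++ [k])) rev).getD c []
      = rev.getD c [] ++ List.replicate (fs.count c) k := by
  induction fs generalizing rev with
  | nil => simp
  | cons f fs ih =>
      simp only [List.foldl_cons]
      rw [ih, PySem.Dict.getD_modify]
      by_cases h : c = f
      · subst h
        simp [List.replicate_succ, List.append_assoc]
      · simp [h, Ne.symm h]

theorem revBuild_aux (net : PySem.Dict String (List String)) (ks : List String)
    (rev0 : PySem.Dict String (List String)) (f : String) :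
    (ks.foldl (fun rev k =>
        (PySem.List.dedup (net.getD k [])).foldl (fun r g => r.modify g [] (· ++ [k])) rev)
      rev0).getD f []
      = rev0.getD f [] ++ ks.filter (fun k => (net.getD k []).contains f) := by
  induction ks generalizing rev0 with
  | nil => simp
  | cons k ks ih =>
      simp only [List.foldl_cons]
      rw [ih, inner_getD]
      have hc : (PySem.List.dedup (net.getD k [])).count f
          = if (net.getD k []).contains f then 1 else 0 := by
        by_cases hm : f ∈ net.getD k []
        · rw [List.count_eq_one_of_mem (PySem.List.nodup_dedup _) ((PySem.List.mem_dedup _ _).mpr hm)]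
          simp [hm]
        · rw [List.count_eq_zero.mpr (by simpa [PySem.List.mem_dedup] using hm)]
          simp [hm]
      rw [hc, List.filter_cons]
      by_cases hm : f ∈ net.getD k []
      · simp [hm, List.append_assoc]
      · simp [hm]

theorem revBuild_getD (net : PySem.Dict String (List String)) (f : String) :
    (revBuild net net.keys).getD f [] = net.keys.filter (fun k => (net.getD k []).contains f) := by
  unfold revBuild
  rw [revBuild_aux]
  simp

theorem count_key (net : PySem.Dict String (List String)) (hnd : net.keys.Nodup) (m j : String) :
    (net.keys.filter (fun x => (net.getD x []).contains m)).count j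
      = if (net.getD j []).contains m then 1 else 0 := by
  by_cases hj : j ∈ net.keys
  · by_cases hp : m ∈ net.getD j []
    · rw [List.count_eq_one_of_mem (hnd.filter _) (List.mem_filter.mpr ⟨hj, by simpa using hp⟩)]
      simp [hp]
    · rw [List.count_eq_zero.mpr (fun hmem => hp (by simpa using List.of_mem_filter hmem))]
      simp [hp]
  · have hget : net.getD j [] = [] := by
      refine PySem.Dict.getD_of_not_contains _ _ ?_
      by_contra hcon
      exact hj ((PySem.Dict.contains_iff_mem_keys net j).mp (by simpa using hcon))
    rw [List.count_eq_zero.mpr (fun hmem => hj (List.mem_of_mem_filter hmem))]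
    simp [hget]

theorem loop_eq (network : List (String × List String))
    (hnd : (PySem.Dict.mk network).keys.Nodup) :
    ∀ (rest community : List String) (cnt : PySem.Dict String Int),
      (∀ k ∈ rest, k ∈ (PySem.Dict.mk network).keys) →
      (∀ j, cnt.getD j 0
          = (community.countP (fun m => ((PySem.Dict.mk network).getD j []).contains m) : Int)) →
      fcLoopA network rest community
        = fcLoopB (revBuild (PySem.Dict.mk network) (PySem.Dict.mk network).keys) rest cnt community := by
  intro rest
  induction rest with
  | nil => intro community cnt _ _; rfl
  | cons k rest ih =>
      intro community cnt hsub hcnt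
      set net := PySem.Dict.mk network with hnet
      have hk : k ∈ net.keys := hsub k (by simp)
      have hcondA : all_his_friends network k community
          = community.all (fun m => (net.getD k []).contains m) := by
        unfold all_his_friends
        rw [ahfLoop_eq_all]
        simp [← hnet, hk]
      have hcondB : (cnt.getD k 0 == (community.length : Int))
          = community.all (fun m => (net.getD k []).contains m) := by
        rw [Bool.eq_iff_iff, List.all_eq_true]
        rw [hcnt k, beq_iff_eq]
        constructor
        · intro h
          exact List.countP_eq_length.mp (by exact_mod_cast h)
        · intro h
          exact_mod_cast congrArg (Nat.cast : Nat → Int) (List.countP_eq_length.mpr h)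
      unfold fcLoopA fcLoopB
      rw [hcondA, hcondB]
      by_cases hcase : community.all (fun m => (net.getD k []).contains m) = true
      · rw [if_pos hcase, if_pos hcase]
        refine ih (community ++ [k]) _ (fun x hx => hsub x (List.mem_cons_of_mem _ hx)) ?_
        intro j
        rw [bump_getD, hcnt j, revBuild_getD, count_key net hnd k j, List.countP_append]
        by_cases hp : k ∈ net.getD j [] <;>
          simp [hp, List.countP_cons]
      · rw [if_neg hcase, if_neg hcase]
        exact ih community cnt (fun x hx => hsub x (List.mem_cons_of_mem _ hx)) hcnt

-- ===== VERDICT (by name: the statement is the Claim_ definition above) =====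
theorem find_community_from_person_spec : Claim_equal_find_community_from_person := by
  intro network person _ hpre
  unfold Spec_find_community_from_person find_community_from_person find_community_from_person_alt
  have hnd : (PySem.Dict.mk network).keys.Nodup := by
    rw [PySem.Dict.keys_mk]; exact hpre
  dsimp only
  apply loop_eq network hnd _ _ _ (fun k hk => hk)
  intro j
  rw [bump_getD, getD_foldl_insert_zero _ _ (fun j => by simp) j, revBuild_getD,
    count_key _ hnd person j]
  by_cases hp : person ∈ (PySem.Dict.mk network).getD j [] <;>
    simp [hp, List.countP_cons]
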